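-- pv_equiv track=rewrite | github.com/mizadri/big-data | Coplete_Index/CompleteIndex.py | decode_unary_stream
-- ===== SOURCE A (Python) =====
-- def decode_unary_stream(bitarr):
-- 	num_array = []
-- 	bit_count = 0
-- 	for bit in bitarr:
-- 		bit_count += 1
-- 		if bit == 0:
-- 			num_array.append(bit_count)
-- 			bit_count = 0
-- 	return num_array
-- ===== SOURCE B (Python) =====
-- def decode_unary_stream(bitarr):
--     zeros = [i for i, bit in enumerate(bitarr) if bit == 0]
--     out = []
--     prev = -1
--     for z in zeros:
--         out.append(z - prev)
--         prev = z
--     return out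
-- ===== Notes on version B (the rewrite author's own statement) =====
-- stated objective: alternative
-- what changed: Replaces the running unary counter with a two-pass index computation: collect the indices of the zero bits via enumerate, then emit consecutive differences of those indices (seeded with -1), which yields the run lengths.
import Mathlib
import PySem

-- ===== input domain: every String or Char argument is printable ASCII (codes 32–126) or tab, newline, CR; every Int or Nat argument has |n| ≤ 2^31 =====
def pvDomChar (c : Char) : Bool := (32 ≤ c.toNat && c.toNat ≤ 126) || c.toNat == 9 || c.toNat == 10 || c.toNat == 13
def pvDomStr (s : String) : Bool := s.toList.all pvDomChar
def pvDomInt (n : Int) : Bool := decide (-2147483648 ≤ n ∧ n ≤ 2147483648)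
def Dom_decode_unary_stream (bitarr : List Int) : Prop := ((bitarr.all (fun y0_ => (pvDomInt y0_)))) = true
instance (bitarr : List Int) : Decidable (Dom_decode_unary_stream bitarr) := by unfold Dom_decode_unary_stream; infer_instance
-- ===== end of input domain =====

-- B replaces A's running unary counter with a two-pass computation (collect zero indices, then
-- consecutive differences); an alternative decomposition, same cost.

-- ===== PORT A =====
-- literal port of A: fold over the bits carrying (num_array, bit_count)
def decode_unary_stream (bitarr : List Int) : List Int :=
  (bitarr.foldl
    (fun (s : List Int × Int) bit =>
      let bit_count := s.2 + 1
      if bit == 0 then (s.1 ++ [bit_count], 0) else (s.1, bit_count))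
    ([], 0)).1

-- ===== PORT B =====
-- literal port of B: zero indices via enumerate+filter, then consecutive differences (prev starts at -1)
def decode_unary_stream_alt (bitarr : List Int) : List Int :=
  let zeros := ((PySem.List.enumerate bitarr).filter (fun p => p.2 == 0)).map Prod.fst
  (zeros.foldl (fun (s : List Int × Int) z => (s.1 ++ [z - s.2], z)) ([], -1)).1

-- ===== PRECONDITION & SPEC =====
def Spec_decode_unary_stream (bitarr : List Int) (out : List Int) : Prop := out = decode_unary_stream_alt bitarr
instance (bitarr : List Int) (out : List Int) : Decidable (Spec_decode_unary_stream bitarr out) := by unfold Spec_decode_unary_stream; infer_instance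

-- ===== CLAIM (what is proved, stated in full; the proofs are below) =====
def Claim_equal_decode_unary_stream : Prop := ∀ (bitarr : List Int), Dom_decode_unary_stream bitarr → Spec_decode_unary_stream bitarr (decode_unary_stream bitarr)

-- ===== LEMMAS AND PROOFS =====

-- reference function: run lengths of l given that c ones have already been counted
def pvRuns (l : List Int) (c : Int) : List Int :=
  match l with
  | [] => []
  | b :: rest => if b == 0 then (c + 1) :: pvRuns rest 0 else pvRuns rest (c + 1)

theorem pvFoldA_eq (l : List Int) : ∀ (acc : List Int) (c : Int),
    (l.foldl
      (fun (s : List Int × Int) bit =>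
        let bit_count := s.2 + 1
        if bit == 0 then (s.1 ++ [bit_count], 0) else (s.1, bit_count))
      (acc, c)).1 = acc ++ pvRuns l c := by
  induction l with
  | nil => intro acc c; simp [pvRuns]
  | cons b rest ih =>
    intro acc c
    rw [List.foldl_cons]
    by_cases hb : b = 0
    · rw [show (let bit_count := ((acc, c) : List Int × Int).2 + 1;
            if (b == 0) = true then ((acc, c).1 ++ [bit_count], (0 : Int))
            else ((acc, c).1, bit_count)) = ((acc ++ [c + 1] : List Int), (0 : Int)) from by
          simp [hb], ih]
      simp [pvRuns, hb]
    · rw [show (let bit_count := ((acc, c) : List Int × Int).2 + 1;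
            if (b == 0) = true then ((acc, c).1 ++ [bit_count], (0 : Int))
            else ((acc, c).1, bit_count)) = ((acc : List Int), c + 1) from by
          simp [hb], ih]
      simp [pvRuns, hb]

-- the zero-index list of l with indices starting at s
def pvZeros (l : List Int) (s : Int) : List Int :=
  ((PySem.List.enumerate l s).filter (fun p => p.2 == 0)).map Prod.fst

theorem pvZeros_cons (b : Int) (l : List Int) (s : Int) :
    pvZeros (b :: l) s = if b = 0 then s :: pvZeros l (s + 1) else pvZeros l (s + 1) := by
  by_cases hb : b = 0 <;> simp [pvZeros, PySem.List.enumerate_cons, hb]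

theorem pvFoldB_eq (l : List Int) : ∀ (s : Int) (acc : List Int) (c : Int),
    ((pvZeros l s).foldl (fun (st : List Int × Int) z => (st.1 ++ [z - st.2], z))
      (acc, s - c - 1)).1 = acc ++ pvRuns l c := by
  induction l with
  | nil => intro s acc c; simp [pvZeros, PySem.List.enumerate, pvRuns]
  | cons b rest ih =>
    intro s acc c
    rw [pvZeros_cons]
    by_cases hb : b = 0
    · simp only [hb, if_true, List.foldl_cons]
      rw [show s - (s - c - 1) = c + 1 from by ring]
      have hih := ih (s + 1) (acc ++ [c + 1]) 0
      rw [show (s + 1 : Int) - 0 - 1 = s by ring] at hih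
      rw [hih]
      simp [pvRuns]
    · simp only [hb, if_false]
      have hih := ih (s + 1) acc (c + 1)
      rw [show (s + 1 : Int) - (c + 1) - 1 = s - c - 1 by ring] at hih
      rw [hih]
      simp [pvRuns, hb]

-- ===== VERDICT (by name: the statement is the Claim_ definition above) =====
theorem decode_unary_stream_spec : Claim_equal_decode_unary_stream := by
  intro bitarr _
  unfold Spec_decode_unary_stream decode_unary_stream decode_unary_stream_alt
  have hA := pvFoldA_eq bitarr [] 0
  have hB := pvFoldB_eq bitarr 0 [] 0
  simp only [List.nil_append] at hA hB
  rw [hA]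
  show pvRuns bitarr 0 =
    ((pvZeros bitarr 0).foldl (fun (st : List Int × Int) z => (st.1 ++ [z - st.2], z)) ([], -1)).1
  rw [show (-1 : Int) = 0 - 0 - 1 by ring, hB]
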